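-- pv_equiv track=rewrite | github.com/Lucasgesu/AED1-2023- | 4º bimestre/letras.py | calcfrequencia
-- ===== SOURCE A (Python) =====
-- def calcfrequencia(texto):
--     contletras = {}
--
--     for char in texto.lower():
--
--         if char.isalpha():
--             contletras[char] = contletras.get(char, 0) + 1
--
--     maxcontagem = max(contletras.values())
--
--     letrasmaisfrequentes = [letra for letra, contagem in contletras.items() if contagem == maxcontagem]
--
--     letrasmaisfrequentes.sort()
--
--     return letrasmaisfrequentes
-- ===== SOURCE B (Python) =====
-- def calcfrequencia(texto):
--     letras = [c for c in texto.lower() if c.isalpha()]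
--     pares = [(c, letras.count(c)) for c in "abcdefghijklmnopqrstuvwxyz" if c in letras]
--     maior = max(n for _, n in pares)
--     return [c for c, n in pares if n == maior]
-- ===== Notes on version B (the rewrite author's own statement) =====
-- stated objective: alternative
-- what changed: replaces the hash-map counting pass plus a final sort of the winners with a fixed-alphabet scan: each of the 26 lowercase letters is counted directly in the letter list and the winners come out already in alphabetical order, so no dict and no sort are needed
import Mathlib
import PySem

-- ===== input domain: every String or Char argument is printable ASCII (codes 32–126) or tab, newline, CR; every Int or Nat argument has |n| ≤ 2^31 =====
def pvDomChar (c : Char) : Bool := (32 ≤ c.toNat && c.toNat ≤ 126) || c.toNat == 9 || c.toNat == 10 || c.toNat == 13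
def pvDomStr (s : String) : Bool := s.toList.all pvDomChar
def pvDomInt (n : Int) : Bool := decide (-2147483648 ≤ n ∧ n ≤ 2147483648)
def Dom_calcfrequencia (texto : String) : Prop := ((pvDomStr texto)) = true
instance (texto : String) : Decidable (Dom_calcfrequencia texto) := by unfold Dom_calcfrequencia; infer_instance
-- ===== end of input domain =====

-- B replaces A's dict-counting pass plus final sort with a fixed-alphabet scan (count each of the 26
-- lowercase letters directly; winners come out already alphabetical) — objective: alternative.

-- ===== PORT A =====
def calcfrequencia (texto : String) : List String :=
  let contletras := ((PySem.Str.lower texto).toList).foldl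
      (fun d char => if PySem.Chars.isalpha char then d.insert char (d.getD char 0 + 1) else d)
      (PySem.Dict.empty : PySem.Dict Char Int)
  match PySem.List.max? contletras.values (fun v => v) with
  | none => []  -- Python: max() over the empty dict raises ValueError; excluded by Pre_
  | some maxcontagem =>
    let letrasmaisfrequentes :=
      (contletras.items.filter (fun p => p.2 == maxcontagem)).map (fun p => p.1)
    (PySem.List.sorted letrasmaisfrequentes (fun x => x) false).map (fun letra => String.mk [letra])

-- ===== PORT B =====
def calcfrequencia_alt (texto : String) : List String :=
  let letras := ((PySem.Str.lower texto).toList).filter (fun c => PySem.Chars.isalpha c)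
  let pares := "abcdefghijklmnopqrstuvwxyz".toList.filterMap
      (fun c => if letras.contains c then some (c, (letras.count c : Int)) else none)
  match PySem.List.max? (pares.map (fun p => p.2)) (fun v => v) with
  | none => []  -- Python: max() over an empty generator raises ValueError; excluded by Pre_
  | some maior =>
    (pares.filter (fun p => p.2 == maior)).map (fun p => String.mk [p.1])

-- ===== PRECONDITION & SPEC =====
-- Pre_ excludes exactly the texts with no alphabetic character, on which A (and B too) raise ValueError.
def Pre_calcfrequencia (texto : String) : Prop :=
  ((PySem.Str.lower texto).toList.filter (fun c => PySem.Chars.isalpha c)) ≠ []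
instance (texto : String) : Decidable (Pre_calcfrequencia texto) := by
  unfold Pre_calcfrequencia; infer_instance
def pvWitness_calcfrequencia : String := "Hello World"

def Spec_calcfrequencia (texto : String) (out : List String) : Prop := out = calcfrequencia_alt texto
instance (texto : String) (out : List String) : Decidable (Spec_calcfrequencia texto out) := by
  unfold Spec_calcfrequencia; infer_instance

-- ===== CLAIM (what is proved, stated in full; the proofs are below) =====
def Claim_equal_calcfrequencia : Prop := ∀ (texto : String), Dom_calcfrequencia texto → Pre_calcfrequencia texto → Spec_calcfrequencia texto (calcfrequencia texto)

-- ===== LEMMAS AND PROOFS =====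

theorem foldl_if_filter {δ : Type} (p : Char → Bool) (g : δ → Char → δ) :
    ∀ (l : List Char) (d : δ),
      l.foldl (fun d c => if p c then g d c else d) d = (l.filter p).foldl g d := by
  intro l
  induction l with
  | nil => intro d; rfl
  | cons c t ih => intro d; by_cases h : p c = true <;> simp [h, ih]

theorem filterMap_if_eq_map_filter {α β : Type} (p : α → Bool) (f : α → β) :
    ∀ (l : List α), l.filterMap (fun c => if p c then some (f c) else none)
      = (l.filter p).map f := by
  intro l
  induction l with
  | nil => rfl
  | cons c t ih => by_cases h : p c = true <;> simp [h, ih]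

def alphaL : List Char := ['a','b','c','d','e','f','g','h','i','j','k','l','m','n','o','p','q','r','s','t','u','v','w','x','y','z']

theorem alpha_toList : "abcdefghijklmnopqrstuvwxyz".toList = alphaL := by decide

theorem mem_alpha_of_islower (c : Char) (h : PySem.Chars.islower c = true) : c ∈ alphaL := by
  simp [PySem.Chars.islower, Char.le_def, UInt32.le_iff_toNat_le] at h
  simp [alphaL, Char.ext_iff, UInt32.ext_iff]
  omega

theorem lower_mem_alpha (c : Char) (h : PySem.Chars.isalpha (PySem.Chars.lowerChar c) = true) :
    PySem.Chars.lowerChar c ∈ alphaL := by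
  apply mem_alpha_of_islower
  by_cases hu : PySem.Chars.isupper c = true
  · have hb : 65 ≤ c.toNat ∧ c.toNat ≤ 90 := by
      simp [PySem.Chars.isupper, Char.le_def, UInt32.le_iff_toNat_le] at hu
      omega
    have hv : (Char.ofNat (c.toNat + 32)).toNat = c.toNat + 32 := by
      rw [Char.toNat_ofNat]
      have : Nat.isValidChar (c.toNat + 32) := by unfold Nat.isValidChar; omega
      simp [this]
    simp [PySem.Chars.lowerChar, hu, PySem.Chars.islower, Char.le_def, UInt32.le_iff_toNat_le, hv]
    omega
  · simp [PySem.Chars.lowerChar, hu] at h ⊢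
    simp [PySem.Chars.isalpha, hu] at h
    exact h

theorem mem_alpha_of_mem_letras {texto : String} {c : Char}
    (h : c ∈ ((PySem.Str.lower texto).toList.filter (fun c => PySem.Chars.isalpha c))) :
    c ∈ alphaL := by
  rw [PySem.Str.toList_lower] at h
  simp [List.mem_filter, PySem.Chars.lower] at h
  obtain ⟨⟨c0, _, rfl⟩, ha⟩ := h
  exact lower_mem_alpha c0 ha

theorem max?_eq_of_perm {l1 l2 : List Int} (h : l1.Perm l2) {m1 m2 : Int}
    (h1 : PySem.List.max? l1 (fun v => v) = some m1)
    (h2 : PySem.List.max? l2 (fun v => v) = some m2) : m1 = m2 :=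
  le_antisymm (PySem.List.max?_isMax h2 m1 (h.mem_iff.mp (PySem.List.max?_mem h1)))
    (PySem.List.max?_isMax h1 m2 (h.mem_iff.mpr (PySem.List.max?_mem h2)))

theorem calcfrequencia_eq (texto : String) (hpre : Pre_calcfrequencia texto) :
    calcfrequencia texto = calcfrequencia_alt texto := by
  unfold calcfrequencia calcfrequencia_alt
  simp only [foldl_if_filter, PySem.Dict.foldl_insert_getD_add_one_eq_counter,
    filterMap_if_eq_map_filter, alpha_toList]
  set L := (PySem.Str.lower texto).toList with hL
  set F := L.filter (fun c => PySem.Chars.isalpha c) with hF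
  set K1 := PySem.Set.ofList F with hK1
  set K2 := alphaL.filter (fun c => F.contains c) with hK2
  have hvals : (PySem.Dict.counter F).values = K1.map (fun k => ((F.count k : Int))) := by
    simp [PySem.Dict.values, PySem.Dict.items_counter, List.map_map]
    rfl
  have hKperm : K1.Perm K2 := by
    rw [List.perm_ext_iff_of_nodup (PySem.Set.nodup_ofList F)
      ((by decide : alphaL.Nodup).filter _)]
    intro a
    simp [PySem.Set.mem_ofList, List.mem_filter]
    intro haF
    exact mem_alpha_of_mem_letras (hF ▸ haF)
  have hvperm : ((PySem.Dict.counter F).values).Perm (K2.map (fun c => (F.count c : Int))) := by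
    rw [hvals]; exact hKperm.map _
  -- nonemptiness
  obtain ⟨x, hx⟩ := List.exists_mem_of_ne_nil _ hpre
  have hK1ne : (PySem.Dict.counter F).values ≠ [] := by
    rw [hvals]
    simp only [ne_eq, List.map_eq_nil_iff]
    intro hnil
    have := (PySem.Set.mem_ofList F x).mpr hx
    rw [← hK1, hnil] at this
    exact List.not_mem_nil this
  -- the two maxima agree
  rcases hma : PySem.List.max? (PySem.Dict.counter F).values (fun v => v) with _ | m
  · exact absurd ((PySem.List.max?_eq_none_iff _ _).mp hma) hK1ne
  rcases hmb : PySem.List.max? ((K2.map (fun c => (c, (F.count c : Int)))).map (fun p => p.2)) (fun v => v) with _ | m'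
  · have h0 := (PySem.List.max?_eq_none_iff _ _).mp hmb
    simp only [List.map_eq_nil_iff] at h0
    rw [h0] at hvperm
    simp only [List.map_nil, List.perm_nil] at hvperm
    exact absurd hvperm hK1ne
  have hmm : m = m' := by
    refine max?_eq_of_perm ?_ hma hmb
    rw [List.map_map]
    exact hvperm
  subst hmm
  rw [hmb]
  dsimp only
  -- final lists
  have hitems : (PySem.Dict.counter F).items = K1.map (fun k => (k, (F.count k : Int))) :=
    PySem.Dict.items_counter F
  rw [hitems]
  rw [List.filter_map, List.filter_map, List.map_map]
  set q : Char → Bool := fun c => ((F.count c : Int) == m) with hq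
  have hfilt1 : (List.filter ((fun p => p.2 == m) ∘ fun k => (k, (F.count k : Int))) K1)
      = K1.filter q := rfl
  have hfilt2 : (List.filter ((fun p => p.2 == m) ∘ fun c => (c, (F.count c : Int))) K2)
      = K2.filter q := rfl
  rw [hfilt1, hfilt2]
  have hcomp1 : ((fun p => p.1) ∘ fun k : Char => (k, (F.count k : Int))) = fun k => k := rfl
  have hcomp2 : ((fun p => String.mk [p.1]) ∘ fun c : Char => (c, (F.count c : Int)))
      = fun c => String.mk [c] := rfl
  rw [hcomp1, List.map_map, hcomp2]
  have hsorted : PySem.List.sorted (List.map (fun k => k) (K1.filter q)) (fun x => x) false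
      = K2.filter q := by
    apply PySem.List.sorted_eq_of_perm_of_pairwise_lt
    · rw [List.map_id']
      rw [List.perm_ext_iff_of_nodup (((by decide : alphaL.Nodup).filter _).filter _)
        ((PySem.Set.nodup_ofList F).filter _)]
      intro a
      simp only [List.mem_filter, List.contains_iff_mem, PySem.Set.mem_ofList, and_assoc]
      constructor
      · rintro ⟨_, haF, hq⟩; exact ⟨haF, hq⟩
      · rintro ⟨haF, hq⟩
        exact ⟨mem_alpha_of_mem_letras (hF ▸ haF), haF, hq⟩
    · exact ((by decide : alphaL.Pairwise (· < ·)).filter _).filter _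
  rw [hsorted]


-- ===== VERDICT (by name: the statement is the Claim_ definition above) =====
theorem calcfrequencia_spec : Claim_equal_calcfrequencia := by
  intro texto _ hpre
  unfold Spec_calcfrequencia
  exact calcfrequencia_eq texto hpre
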